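-- pv_equiv track=rewrite | github.com/Paulo-Filipe/earlycoding | iteration.py | sum_even2
-- ===== SOURCE A (Python) =====
-- def sum_even2(lista):
--     sumeven = 0
--     controle = 0
--     for i in lista:
--         if i % 2 == 0 and controle == 0:
--             controle += 1
--             continue
--         elif i % 2 == 0 and controle != 0:
--             sumeven += i
--         else:
--             continue
--     print ("A soma total dos números pares (com exceção do primeiro) é " + str(sumeven))
--     return sumeven
-- ===== SOURCE B (Python) =====
-- def sum_even2(lista):
--     evens = [i for i in lista if i % 2 == 0]
--     sumeven = sum(evens[1:])
--     print ("A soma total dos números pares (com exceção do primeiro) é " + str(sumeven))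
--     return sumeven
-- ===== Notes on version B (the rewrite author's own statement) =====
-- stated objective: simpler
-- what changed: Replaces the single stateful pass with a skip-first flag by a two-stage filter-then-sum: build the list of evens with a comprehension, drop the first via slicing, and sum.
import Mathlib
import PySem

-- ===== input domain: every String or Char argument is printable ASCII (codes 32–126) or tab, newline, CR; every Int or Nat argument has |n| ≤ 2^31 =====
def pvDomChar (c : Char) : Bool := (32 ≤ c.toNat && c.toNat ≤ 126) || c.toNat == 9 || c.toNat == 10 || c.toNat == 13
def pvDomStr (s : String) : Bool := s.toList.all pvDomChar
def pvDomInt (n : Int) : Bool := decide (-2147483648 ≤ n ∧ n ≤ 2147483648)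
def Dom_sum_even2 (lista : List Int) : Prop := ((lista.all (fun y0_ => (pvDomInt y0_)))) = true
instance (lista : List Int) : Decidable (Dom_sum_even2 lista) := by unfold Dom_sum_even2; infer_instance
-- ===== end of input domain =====

-- B replaces A's single flagged pass by filter-then-drop-then-sum (objective: simpler).
-- The print side effect is not modelled; equivalence is about the return value only.

-- ===== PORT A =====
-- state = (sumeven, controle); branches in A's order
def sum_even2 (lista : List Int) : Int :=
  (lista.foldl (fun (s : Int × Int) i =>
      if i % 2 == 0 && s.2 == 0 then (s.1, s.2 + 1)
      else if i % 2 == 0 && s.2 != 0 then (s.1 + i, s.2)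
      else s) (0, 0)).1

-- ===== PORT B =====
-- evens = [i for i in lista if i % 2 == 0]; sum(evens[1:])
def sum_even2_alt (lista : List Int) : Int :=
  (((lista.filter (fun i => i % 2 == 0)).drop 1).foldl (· + ·) 0)

-- ===== PRECONDITION & SPEC =====
def Spec_sum_even2 (lista : List Int) (out : Int) : Prop := out = sum_even2_alt lista
instance (lista : List Int) (out : Int) : Decidable (Spec_sum_even2 lista out) := by unfold Spec_sum_even2; infer_instance

-- ===== CLAIM (what is proved, stated in full; the proofs are below) =====
def Claim_equal_sum_even2 : Prop := ∀ (lista : List Int), Dom_sum_even2 lista → Spec_sum_even2 lista (sum_even2 lista)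

-- ===== LEMMAS AND PROOFS =====

-- shift lemma for the plain additive fold
theorem pv_foldl_add_shift (l : List Int) (s : Int) :
    l.foldl (· + ·) s = s + l.foldl (· + ·) 0 := by
  induction l generalizing s with
  | nil => simp
  | cons a t ih =>
      rw [List.foldl_cons, List.foldl_cons, ih (s + a), ih (0 + a)]
      ring

-- after the first even was consumed (controle = 1), A just sums the remaining evens
theorem pv_foldA_one (l : List Int) (s : Int) :
    (l.foldl (fun (st : Int × Int) i =>
        if i % 2 == 0 && st.2 == 0 then (st.1, st.2 + 1)
        else if i % 2 == 0 && st.2 != 0 then (st.1 + i, st.2)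
        else st) (s, 1)).1
      = s + (l.filter (fun i => i % 2 == 0)).foldl (· + ·) 0 := by
  induction l generalizing s with
  | nil => simp
  | cons a t ih =>
      by_cases h : a % 2 = 0
      · have hb : (a % 2 == 0) = true := by simp [h]
        simp only [List.foldl_cons, List.filter_cons, hb, Bool.true_and, if_true,
          (by decide : (((1:Int) == 0) = true) = False), (by decide : (((1:Int) != 0) = true) = True),
          if_false, if_true]
        rw [ih (s + a), pv_foldl_add_shift (t.filter (fun i => i % 2 == 0)) (0 + a)]
        ring
      · have hb : (a % 2 == 0) = false := by simp [h]
        simp only [List.foldl_cons, List.filter_cons, hb, Bool.false_and,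
          (by decide : ((false = true)) = False), if_false]
        exact ih s

-- ===== VERDICT (by name: the statement is the Claim_ definition above) =====
theorem sum_even2_spec : Claim_equal_sum_even2 := by
  intro lista hdom
  clear hdom
  unfold Spec_sum_even2 sum_even2 sum_even2_alt
  induction lista with
  | nil => simp
  | cons a t ih =>
      by_cases h : a % 2 = 0
      · have hb : (a % 2 == 0) = true := by simp [h]
        simp only [List.foldl_cons, List.filter_cons, hb, Bool.true_and, if_true,
          (by decide : (((0:Int) == 0) = true) = True), List.drop_one, List.tail_cons, zero_add]
        rw [pv_foldA_one t 0]
        simp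
      · have hb : (a % 2 == 0) = false := by simp [h]
        simp only [List.foldl_cons, List.filter_cons, hb, Bool.false_and,
          (by decide : ((false = true)) = False), if_false]
        exact ih
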